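-- pv_equiv track=rewrite | github.com/JoaoMiranda2005/AulasPyhton | Aula 27-2/exercicio11.py | contar_nomes
-- ===== SOURCE A (Python) =====
-- def contar_nomes(lista_nomes):
--     contagem_nomes = {}
--     for nome in lista_nomes:
--         if nome in contagem_nomes:
--             contagem_nomes[nome] += 1
--         else:
--             contagem_nomes[nome] = 1
--     return contagem_nomes
-- ===== SOURCE B (Python) =====
-- def contar_nomes(lista_nomes):
--     return {nome: lista_nomes.count(nome) for nome in dict.fromkeys(lista_nomes)}
-- ===== Notes on version B (the rewrite author's own statement) =====
-- stated objective: simpler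
-- what changed: Replaces the single accumulating dict pass with a one-line dict comprehension over the ordered distinct names (dict.fromkeys), each mapped to lista_nomes.count(nome).
import Mathlib
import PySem

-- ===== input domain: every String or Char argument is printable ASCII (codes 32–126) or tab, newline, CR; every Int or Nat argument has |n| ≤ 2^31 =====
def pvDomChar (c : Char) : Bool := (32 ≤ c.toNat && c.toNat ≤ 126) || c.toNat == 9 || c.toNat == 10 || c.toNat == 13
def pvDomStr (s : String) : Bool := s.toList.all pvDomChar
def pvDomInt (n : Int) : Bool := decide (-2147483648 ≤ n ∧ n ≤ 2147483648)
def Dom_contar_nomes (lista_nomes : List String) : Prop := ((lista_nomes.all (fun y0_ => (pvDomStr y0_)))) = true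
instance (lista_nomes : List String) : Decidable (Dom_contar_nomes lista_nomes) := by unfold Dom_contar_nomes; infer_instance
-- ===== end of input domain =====

-- B replaces A's single accumulating dict pass with a dict comprehension over the
-- ordered distinct names, each mapped to its list.count — simpler, not faster.

-- ===== PORT A =====
-- for nome in lista: if nome in d: d[nome] += 1 else: d[nome] = 1; return d (its items)
def contar_nomes (lista_nomes : List String) : List (String × Int) :=
  (lista_nomes.foldl
    (fun (d : PySem.Dict String Int) nome =>
      if PySem.Dict.contains d nome then
        PySem.Dict.insert d nome (PySem.Dict.getD d nome 0 + 1)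
      else
        PySem.Dict.insert d nome 1)
    PySem.Dict.empty).items

-- ===== PORT B =====
-- {nome: lista_nomes.count(nome) for nome in dict.fromkeys(lista_nomes)}
def contar_nomes_alt (lista_nomes : List String) : List (String × Int) :=
  (PySem.List.dedup lista_nomes).map (fun nome => (nome, (lista_nomes.count nome : Int)))

-- ===== PRECONDITION & SPEC =====
def Spec_contar_nomes (lista_nomes : List String) (out : List (String × Int)) : Prop := out = contar_nomes_alt lista_nomes
instance (lista_nomes : List String) (out : List (String × Int)) : Decidable (Spec_contar_nomes lista_nomes out) := by unfold Spec_contar_nomes; infer_instance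

-- ===== CLAIM (what is proved, stated in full; the proofs are below) =====
def Claim_equal_contar_nomes : Prop := ∀ (lista_nomes : List String), Dom_contar_nomes lista_nomes → Spec_contar_nomes lista_nomes (contar_nomes lista_nomes)

-- ===== LEMMAS AND PROOFS =====

-- A's branching loop body is the unconditional 'insert nome (getD nome 0 + 1)':
-- when the key is absent getD gives the default 0.
theorem contar_nomes_body_eq :
    (fun (d : PySem.Dict String Int) nome =>
      if PySem.Dict.contains d nome then
        PySem.Dict.insert d nome (PySem.Dict.getD d nome 0 + 1)
      else
        PySem.Dict.insert d nome 1)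
    = (fun (d : PySem.Dict String Int) nome =>
        PySem.Dict.insert d nome (PySem.Dict.getD d nome 0 + 1)) := by
  funext d nome
  by_cases h : PySem.Dict.contains d nome = true
  · simp [h]
  · have hc : PySem.Dict.contains d nome = false := by simpa using h
    rw [PySem.Dict.getD_of_not_contains d 0 hc]
    simp [hc]

-- ===== VERDICT (by name: the statement is the Claim_ definition above) =====
theorem contar_nomes_spec : Claim_equal_contar_nomes := by
  intro lista_nomes _
  unfold Spec_contar_nomes contar_nomes contar_nomes_alt
  rw [contar_nomes_body_eq, PySem.Dict.foldl_insert_getD_add_one_eq_counter,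
      PySem.Dict.items_counter, PySem.List.dedup_eq_ofList]
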